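-- pv_equiv track=rewrite | github.com/noorvrst/PPCHEM_molstorage | src/molstorage/molstorage.py | is_compatible_picto_ab
-- ===== SOURCE A (Python) =====
-- def is_compatible_picto_ab(existing_pictograms, new_pictograms, existing_acid_base_class, new_acid_base_class):
--     """
--     Checks if two chemicals (represented by their pictograms and acid/base class)
--     are compatible for storage.
--     """
--
--     # Rule 1: Acid/base incompatibility
--     if ("acid" in existing_acid_base_class and "base" in new_acid_base_class) or \
--        ("base" in existing_acid_base_class and "acid" in new_acid_base_class):
--         return False
--
--     # Rule 2: Pictogram incompatibilities
--     incompatible_pairs = [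
--         ("Flammable", "Oxidizer"),
--         ("Corrosive", "Flammable"),
--     ]
--
--     for pic1 in existing_pictograms:
--         for pic2 in new_pictograms:
--             if (pic1, pic2) in incompatible_pairs or (pic2, pic1) in incompatible_pairs:
--                 return False
--
--     # Rule 3: Acid + Corrosive + Acute Toxic or Health Hazard
--     if "acid" in existing_acid_base_class and "Corrosive" in existing_pictograms:
--         if "Acute Toxic" in new_pictograms or "Health Hazard" in new_pictograms:
--             return False
--     if "acid" in new_acid_base_class and "Corrosive" in new_pictograms:
--         if "Acute Toxic" in existing_pictograms or "Health Hazard" in existing_pictograms: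
--             return False
--
--     # All checks passed
--     return True
-- ===== SOURCE B (Python) =====
-- def is_compatible_picto_ab(existing_pictograms, new_pictograms, existing_acid_base_class, new_acid_base_class):
--     # Rule 1: Acid/base incompatibility
--     acid_e = "acid" in existing_acid_base_class
--     base_e = "base" in existing_acid_base_class
--     acid_n = "acid" in new_acid_base_class
--     base_n = "base" in new_acid_base_class
--     if (acid_e and base_n) or (base_e and acid_n):
--         return False
--     # Rule 2: pictogram incompatibilities as flat membership tests (no pairwise scan)
--     e = set(existing_pictograms)
--     n = set(new_pictograms)
--     if ("Flammable" in e and ("Oxidizer" in n or "Corrosive" in n)) or \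
--        ("Flammable" in n and ("Oxidizer" in e or "Corrosive" in e)):
--         return False
--     # Rule 3: Acid + Corrosive + Acute Toxic or Health Hazard
--     if acid_e and "Corrosive" in e and ("Acute Toxic" in n or "Health Hazard" in n):
--         return False
--     if acid_n and "Corrosive" in n and ("Acute Toxic" in e or "Health Hazard" in e):
--         return False
--     return True
-- ===== Notes on version B (the rewrite author's own statement) =====
-- stated objective: faster
-- what changed: Replaces the O(n*m) nested loop over all cross pairs of pictograms with a constant number of flat set-membership tests covering the symmetric incompatible pairs explicitly.
import Mathlib
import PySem

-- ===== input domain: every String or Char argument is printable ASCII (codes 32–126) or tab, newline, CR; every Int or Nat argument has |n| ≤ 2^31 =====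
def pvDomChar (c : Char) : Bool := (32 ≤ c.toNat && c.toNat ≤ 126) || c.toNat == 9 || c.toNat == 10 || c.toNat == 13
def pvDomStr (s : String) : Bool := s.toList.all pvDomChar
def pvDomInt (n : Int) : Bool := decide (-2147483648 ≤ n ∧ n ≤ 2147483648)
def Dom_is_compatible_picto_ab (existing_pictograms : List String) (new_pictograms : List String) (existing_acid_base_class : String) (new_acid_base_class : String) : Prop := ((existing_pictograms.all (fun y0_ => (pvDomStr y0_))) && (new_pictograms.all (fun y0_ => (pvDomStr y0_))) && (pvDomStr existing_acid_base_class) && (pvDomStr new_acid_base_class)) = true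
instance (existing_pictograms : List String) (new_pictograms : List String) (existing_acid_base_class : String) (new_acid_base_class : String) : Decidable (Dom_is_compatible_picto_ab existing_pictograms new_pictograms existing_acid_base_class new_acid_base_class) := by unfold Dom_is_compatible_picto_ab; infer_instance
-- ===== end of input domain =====

-- B replaces A's nested pairwise loop by a flat set of membership tests (objective: simpler).

-- ===== PORT A =====
-- the incompatible_pairs list literal from A
def pvPairsA : List (String × String) := [("Flammable", "Oxidizer"), ("Corrosive", "Flammable")]

def is_compatible_picto_ab (existing_pictograms : List String) (new_pictograms : List String) (existing_acid_base_class : String) (new_acid_base_class : String) : Bool :=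
  -- Rule 1
  if (PySem.Str.isIn "acid" existing_acid_base_class && PySem.Str.isIn "base" new_acid_base_class) ||
     (PySem.Str.isIn "base" existing_acid_base_class && PySem.Str.isIn "acid" new_acid_base_class) then
    false
  -- Rule 2: the nested for-loops with early return, as nested `any`
  else if existing_pictograms.any (fun pic1 =>
           new_pictograms.any (fun pic2 =>
             pvPairsA.contains (pic1, pic2) || pvPairsA.contains (pic2, pic1))) then
    false
  -- Rule 3
  else if PySem.Str.isIn "acid" existing_acid_base_class && existing_pictograms.contains "Corrosive" &&
          (new_pictograms.contains "Acute Toxic" || new_pictograms.contains "Health Hazard") then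
    false
  else if PySem.Str.isIn "acid" new_acid_base_class && new_pictograms.contains "Corrosive" &&
          (existing_pictograms.contains "Acute Toxic" || existing_pictograms.contains "Health Hazard") then
    false
  else
    true

-- ===== PORT B =====
def is_compatible_picto_ab_alt (existing_pictograms : List String) (new_pictograms : List String) (existing_acid_base_class : String) (new_acid_base_class : String) : Bool :=
  let acid_e := PySem.Str.isIn "acid" existing_acid_base_class
  let base_e := PySem.Str.isIn "base" existing_acid_base_class
  let acid_n := PySem.Str.isIn "acid" new_acid_base_class
  let base_n := PySem.Str.isIn "base" new_acid_base_class
  if (acid_e && base_n) || (base_e && acid_n) then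
    false
  else
    let e := PySem.Set.ofList existing_pictograms
    let n := PySem.Set.ofList new_pictograms
    if (PySem.Set.contains e "Flammable" && (PySem.Set.contains n "Oxidizer" || PySem.Set.contains n "Corrosive")) ||
       (PySem.Set.contains n "Flammable" && (PySem.Set.contains e "Oxidizer" || PySem.Set.contains e "Corrosive")) then
      false
    else if acid_e && PySem.Set.contains e "Corrosive" && (PySem.Set.contains n "Acute Toxic" || PySem.Set.contains n "Health Hazard") then
      false
    else if acid_n && PySem.Set.contains n "Corrosive" && (PySem.Set.contains e "Acute Toxic" || PySem.Set.contains e "Health Hazard") then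
      false
    else
      true

-- ===== PRECONDITION & SPEC =====
def Spec_is_compatible_picto_ab (existing_pictograms : List String) (new_pictograms : List String) (existing_acid_base_class : String) (new_acid_base_class : String) (out : Bool) : Prop := out = is_compatible_picto_ab_alt existing_pictograms new_pictograms existing_acid_base_class new_acid_base_class
instance (existing_pictograms : List String) (new_pictograms : List String) (existing_acid_base_class : String) (new_acid_base_class : String) (out : Bool) : Decidable (Spec_is_compatible_picto_ab existing_pictograms new_pictograms existing_acid_base_class new_acid_base_class out) := by unfold Spec_is_compatible_picto_ab; infer_instance

-- ===== CLAIM (what is proved, stated in full; the proofs are below) =====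
def Claim_equal_is_compatible_picto_ab : Prop := ∀ (existing_pictograms : List String) (new_pictograms : List String) (existing_acid_base_class : String) (new_acid_base_class : String), Dom_is_compatible_picto_ab existing_pictograms new_pictograms existing_acid_base_class new_acid_base_class → Spec_is_compatible_picto_ab existing_pictograms new_pictograms existing_acid_base_class new_acid_base_class (is_compatible_picto_ab existing_pictograms new_pictograms existing_acid_base_class new_acid_base_class)

-- ===== LEMMAS AND PROOFS =====

-- A's nested pairwise scan fires exactly when one of the four ordered cross pairs is present.
lemma rule2_eq (ep np : List String) :
    ep.any (fun pic1 => np.any (fun pic2 =>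
      pvPairsA.contains (pic1, pic2) || pvPairsA.contains (pic2, pic1))) =
    ((ep.contains "Flammable" && (np.contains "Oxidizer" || np.contains "Corrosive")) ||
     (np.contains "Flammable" && (ep.contains "Oxidizer" || ep.contains "Corrosive"))) := by
  rw [Bool.eq_iff_iff]
  simp [List.any_eq_true, pvPairsA, Prod.ext_iff, List.contains_eq_mem]
  constructor
  · rintro ⟨p1, h1, p2, h2, h⟩
    rcases h with (⟨rfl, rfl⟩ | ⟨rfl, rfl⟩) | (⟨rfl, rfl⟩ | ⟨rfl, rfl⟩) <;> tauto
  · rintro (⟨hF, hO | hC⟩ | ⟨hF, hO | hC⟩)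
    · exact ⟨_, hF, _, hO, Or.inl (Or.inl ⟨rfl, rfl⟩)⟩
    · exact ⟨_, hF, _, hC, Or.inr (Or.inr ⟨rfl, rfl⟩)⟩
    · exact ⟨_, hO, _, hF, Or.inr (Or.inl ⟨rfl, rfl⟩)⟩
    · exact ⟨_, hC, _, hF, Or.inl (Or.inr ⟨rfl, rfl⟩)⟩

-- ===== VERDICT (by name: the statement is the Claim_ definition above) =====
theorem is_compatible_picto_ab_spec : Claim_equal_is_compatible_picto_ab := by
  intro ep np ec nc _
  unfold Spec_is_compatible_picto_ab is_compatible_picto_ab is_compatible_picto_ab_alt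
  rw [rule2_eq]
  simp only [PySem.Set.contains_eq_listContains, PySem.Set.mem_ofList, List.contains_eq_mem]
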